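-- pv_equiv track=rewrite | github.com/scl2589/Algorithm_problem_solving | Programmers/17681_비밀지도/비밀지도.py | solution
-- ===== SOURCE A (Python) =====
-- def solution(n, arr1, arr2):
--     answer = []
--     zipped = zip(arr1, arr2)
--     for n1, n2 in zipped:
--         temp = bin(n1 | n2)[2:]
--         if len(temp) < n:
--             temp = '0' * (n - len(temp)) + temp
--         temp = temp.replace('1', '#')
--         temp = temp.replace('0', ' ')
--         answer.append(temp)
--     return answer
-- ===== SOURCE B (Python) =====
-- def solution(n, arr1, arr2):
--     rows = []
--     for a, b in zip(arr1, arr2):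
--         bits = bin(a | b)[2:]
--         chars = []
--         for c in reversed(bits):          # least-significant character first
--             chars.append('#' if c == '1' else ' ' if c == '0' else c)
--         while len(chars) < n:
--             chars.append(' ')             # padding ends up on the left edge
--         chars.reverse()
--         rows.append(''.join(chars))
--     return rows
-- ===== Notes on version B (the rewrite author's own statement) =====
-- stated objective: alternative
-- what changed: B builds each row back-to-front with an explicit accumulator: it walks the binary digits least-significant first, mapping each to '#'/' ' as it goes, appends the space padding (which ends up on the left), and reverses once at the end - replacing A's zero-pad-then-two-whole-string-replace pipeline.
import Mathlib
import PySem

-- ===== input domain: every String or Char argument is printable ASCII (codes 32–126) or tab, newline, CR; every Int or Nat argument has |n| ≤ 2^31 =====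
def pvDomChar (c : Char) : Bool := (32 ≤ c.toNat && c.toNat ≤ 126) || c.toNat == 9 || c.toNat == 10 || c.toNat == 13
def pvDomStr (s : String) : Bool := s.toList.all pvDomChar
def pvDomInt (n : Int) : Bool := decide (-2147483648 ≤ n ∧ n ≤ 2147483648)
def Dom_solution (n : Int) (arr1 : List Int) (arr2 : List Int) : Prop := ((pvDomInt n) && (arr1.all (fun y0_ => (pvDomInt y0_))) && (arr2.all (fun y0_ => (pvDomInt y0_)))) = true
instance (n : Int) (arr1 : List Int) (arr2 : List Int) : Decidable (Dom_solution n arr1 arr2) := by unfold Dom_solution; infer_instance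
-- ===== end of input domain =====

-- B builds each row back-to-front (least-significant digit first, mapped into an accumulator,
-- padding appended, one final reverse) instead of A's zero-pad + two whole-string replace passes.

-- ===== PORT A =====
def solution (n : Int) (arr1 : List Int) (arr2 : List Int) : List String :=
  -- answer = []; for n1, n2 in zip(arr1, arr2): ...
  (arr1.zip arr2).foldl
    (fun answer p =>
      -- temp = bin(n1 | n2)[2:]
      let temp := PySem.Str.slice (PySem.Int.pyBin (PySem.Int.bor p.1 p.2)) (some 2) none
      -- if len(temp) < n: temp = '0' * (n - len(temp)) + temp
      -- ('0' * k + temp ported by hand on the char list: exact, Python's str * k is '' for k ≤ 0)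
      let temp := if PySem.Str.len temp < n then
          String.ofList (List.replicate (n - PySem.Str.len temp).toNat '0' ++ temp.toList)
        else temp
      -- temp = temp.replace('1', '#'); temp = temp.replace('0', ' ')
      let temp := PySem.Str.replace temp "1" "#"
      let temp := PySem.Str.replace temp "0" " "
      answer ++ [temp])
    []

-- ===== PORT B =====
-- '#' if c == '1' else ' ' if c == '0' else c
def pvMapB (c : Char) : Char := if c = '1' then '#' else if c = '0' then ' ' else c

-- one iteration of B's outer for-loop body
def pvRowB (n : Int) (v : Int) : String :=
  -- bits = bin(a | b)[2:]
  let bits := (PySem.Str.slice (PySem.Int.pyBin v) (some 2) none).toList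
  -- chars = []; for c in reversed(bits): chars.append(...)
  let chars := bits.reverse.foldl (fun acc c => acc ++ [pvMapB c]) ([] : List Char)
  -- while len(chars) < n: chars.append(' ')   (one ' ' per iteration until len ≥ n: exact)
  let chars := chars ++ List.replicate (n - (chars.length : Int)).toNat ' '
  -- chars.reverse(); ''.join(chars)
  String.ofList chars.reverse

def solution_alt (n : Int) (arr1 : List Int) (arr2 : List Int) : List String :=
  -- rows = []; for a, b in zip(arr1, arr2): ...; rows.append(...)
  (arr1.zip arr2).foldl (fun rows p => rows ++ [pvRowB n (PySem.Int.bor p.1 p.2)]) []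

-- ===== PRECONDITION & SPEC =====
def Spec_solution (n : Int) (arr1 : List Int) (arr2 : List Int) (out : List String) : Prop := out = solution_alt n arr1 arr2
instance (n : Int) (arr1 : List Int) (arr2 : List Int) (out : List String) : Decidable (Spec_solution n arr1 arr2 out) := by unfold Spec_solution; infer_instance

-- ===== CLAIM (what is proved, stated in full; the proofs are below) =====
def Claim_equal_solution : Prop := ∀ (n : Int) (arr1 : List Int) (arr2 : List Int), Dom_solution n arr1 arr2 → Spec_solution n arr1 arr2 (solution n arr1 arr2)

-- ===== LEMMAS AND PROOFS =====

-- single-character str.replace is a character map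
theorem pv_replace_go_single (a b : Char) : ∀ (fuel : Nat) (l acc : List Char), l.length ≤ fuel →
    PySem.Chars.replace.go [a] [b] fuel l acc
      = acc.reverse ++ l.map (fun c => if c = a then b else c) := by
  intro fuel
  induction fuel with
  | zero =>
    intro l acc h
    have : l = [] := List.eq_nil_of_length_eq_zero (Nat.le_zero.mp h)
    subst this
    simp [PySem.Chars.replace.go]
  | succ k ih =>
    intro l acc h
    cases l with
    | nil => simp [PySem.Chars.replace.go]
    | cons c t =>
      rw [PySem.Chars.replace.go]
      by_cases hc : c = a
      · subst hc
        have hp : [c].isPrefixOf (c :: t) = true := by simp [List.isPrefixOf]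
        simp only [hp, if_pos, List.length_singleton, List.drop_one, List.tail_cons,
          List.reverse_singleton, List.map_cons]
        rw [ih t ([b] ++ acc) (by simpa using Nat.le_of_succ_le_succ h)]
        simp
      · have hp : [a].isPrefixOf (c :: t) = false := by
          simp [List.isPrefixOf]
          exact fun hh => (hc hh.symm).elim
        simp only [hp, Bool.false_eq_true, List.map_cons]
        rw [ih t (c :: acc) (by simpa using Nat.le_of_succ_le_succ h)]
        simp [hc]

theorem pv_replace_single (a b : Char) (l : List Char) :
    PySem.Chars.replace l [a] [b] = l.map (fun c => if c = a then b else c) := by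
  rw [PySem.Chars.replace]
  simp only [List.isEmpty_cons]
  exact pv_replace_go_single a b l.length l [] (le_refl _)

-- A's two single-character replace passes compose into exactly B's character map
theorem pv_map_map (l : List Char) :
    List.map (fun c => if c = '0' then ' ' else c) (List.map (fun c => if c = '1' then '#' else c) l)
      = List.map pvMapB l := by
  rw [List.map_map]
  refine List.map_congr_left (fun c _ => ?_)
  by_cases h1 : c = '1'
  · subst h1; decide
  · by_cases h0 : c = '0'
    · subst h0; decide
    · simp [pvMapB, h0, h1]

-- B's inner for-loop is a map
theorem pv_foldB (l : List Char) : ∀ acc : List Char,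
    l.foldl (fun acc c => acc ++ [pvMapB c]) acc = acc ++ l.map pvMapB := by
  induction l with
  | nil => intro acc; simp
  | cons c t ih => intro acc; simp [ih]

-- one row of A equals one row of B
theorem pv_row_eq (n v : Int) :
    (PySem.Str.replace (PySem.Str.replace
        (let temp := PySem.Str.slice (PySem.Int.pyBin v) (some 2) none
         if PySem.Str.len temp < n then
            String.ofList (List.replicate (n - PySem.Str.len temp).toNat '0' ++ temp.toList)
          else temp) "1" "#") "0" " ")
      = pvRowB n v := by
  apply String.toList_inj.mp
  have h1l : ("1" : String).toList = ['1'] := by decide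
  have h0l : ("0" : String).toList = ['0'] := by decide
  have hhl : ("#" : String).toList = ['#'] := by decide
  have hsl : (" " : String).toList = [' '] := by decide
  simp only [pvRowB, PySem.Str.toList_replace, PySem.Str.len_eq, h1l, h0l, hhl, hsl,
    String.toList_ofList, PySem.Str.toList_slice, PySem.Int.toList_pyBin,
    PySem.Chars.slice_eq_listSlice, apply_ite String.toList]
  generalize PySem.List.slice (PySem.Int.toBinChars0b v) (some 2) none = ds
  rw [pv_foldB]
  simp only [List.nil_append, List.length_map, List.length_reverse, List.reverse_append,
    List.reverse_replicate, List.reverse_reverse, List.map_reverse]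
  by_cases h : ((ds.length : Int) < n)
  · rw [if_pos h]
    rw [pv_replace_single, pv_replace_single, List.map_map, List.map_append, List.map_replicate]
    rw [show ((fun c => if c = '0' then ' ' else c) ∘ fun c => if c = '1' then '#' else c) '0' = ' ' from by decide]
    rw [← List.map_map, pv_map_map]
  · rw [if_neg h]
    rw [pv_replace_single, pv_replace_single]
    rw [pv_map_map]
    have hpad : (n - (ds.length : Int)).toNat = 0 := by omega
    rw [hpad]
    simp

theorem pv_fold_eq (n : Int) (l : List (Int × Int)) : ∀ (acc : List String),
    l.foldl
      (fun answer p =>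
        let temp := PySem.Str.slice (PySem.Int.pyBin (PySem.Int.bor p.1 p.2)) (some 2) none
        let temp := if PySem.Str.len temp < n then
            String.ofList (List.replicate (n - PySem.Str.len temp).toNat '0' ++ temp.toList)
          else temp
        let temp := PySem.Str.replace temp "1" "#"
        let temp := PySem.Str.replace temp "0" " "
        answer ++ [temp]) acc
    = l.foldl (fun rows p => rows ++ [pvRowB n (PySem.Int.bor p.1 p.2)]) acc := by
  induction l with
  | nil => intro acc; simp
  | cons p t ih =>
    intro acc
    simp only [List.foldl_cons]
    rw [← pv_row_eq n (PySem.Int.bor p.1 p.2)]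
    exact ih _

-- ===== VERDICT (by name: the statement is the Claim_ definition above) =====
theorem solution_spec : Claim_equal_solution := by
  intro n arr1 arr2 _
  unfold Spec_solution solution solution_alt
  exact pv_fold_eq n (arr1.zip arr2) []
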